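-- pv_equiv track=rewrite | github.com/arpan-tanwar/animathic | backend/test_simple_system.py | _analyze_persistent_issues
-- ===== SOURCE A (Python) =====
-- from typing import Dict, Any, List
--
-- def _analyze_persistent_issues(results: List[Dict[str, Any]]) -> Dict[str, Any]:
--     """Analyze if persistent issues have been resolved"""
--     issue_analysis = {
--         'flickering_issues': 0,
--         'positioning_issues': 0,
--         'overlap_issues': 0,
--         'fade_out_issues': 0,
--         'smoothness_issues': 0,
--         'shape_issues': 0
--     }
--
--     for result in results:
--         if result['success']:
--             issues_found = result.get('issues_found', [])
--             for issue in issues_found: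
--                 if 'flickering' in issue.lower():
--                     issue_analysis['flickering_issues'] += 1
--                 if 'position' in issue.lower():
--                     issue_analysis['positioning_issues'] += 1
--                 if 'overlap' in issue.lower():
--                     issue_analysis['overlap_issues'] += 1
--                 if 'fade_out' in issue.lower():
--                     issue_analysis['fade_out_issues'] += 1
--                 if 'smooth' in issue.lower():
--                     issue_analysis['smoothness_issues'] += 1
--                 if 'shape' in issue.lower():
--                     issue_analysis['shape_issues'] += 1
--
--     return issue_analysis
-- ===== SOURCE B (Python) =====
-- def _analyze_persistent_issues(results):
--     """Analyze if persistent issues have been resolved"""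
--     lowered = [issue.lower()
--                for result in results if result['success']
--                for issue in result.get('issues_found', [])]
--     return {
--         'flickering_issues': sum('flickering' in i for i in lowered),
--         'positioning_issues': sum('position' in i for i in lowered),
--         'overlap_issues': sum('overlap' in i for i in lowered),
--         'fade_out_issues': sum('fade_out' in i for i in lowered),
--         'smoothness_issues': sum('smooth' in i for i in lowered),
--         'shape_issues': sum('shape' in i for i in lowered),
--     }
-- ===== Notes on version B (the rewrite author's own statement) =====
-- stated objective: alternative
-- what changed: B first flattens all issues of successful results into one lowercased list, then builds the result dict as a literal with one independent counting pass per category, instead of A's single pass mutating a counter dict with six sequential if-updates per issue.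
import Mathlib
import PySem

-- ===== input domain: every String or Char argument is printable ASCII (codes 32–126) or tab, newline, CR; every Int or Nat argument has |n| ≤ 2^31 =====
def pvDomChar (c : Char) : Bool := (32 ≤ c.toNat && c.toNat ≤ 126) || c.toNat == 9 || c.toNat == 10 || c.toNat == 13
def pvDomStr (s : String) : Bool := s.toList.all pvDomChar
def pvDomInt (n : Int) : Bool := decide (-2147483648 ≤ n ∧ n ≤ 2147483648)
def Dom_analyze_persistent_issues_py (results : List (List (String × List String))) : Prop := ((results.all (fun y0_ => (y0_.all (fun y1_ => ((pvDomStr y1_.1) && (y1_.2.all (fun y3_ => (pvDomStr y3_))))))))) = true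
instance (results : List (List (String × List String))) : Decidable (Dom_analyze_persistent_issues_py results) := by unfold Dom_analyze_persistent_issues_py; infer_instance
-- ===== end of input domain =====

-- B flattens all issues of successful results into one lowercased list and builds the
-- result dict as a literal with one independent counting pass per category; A makes a
-- single pass mutating a counter dict. Equal return values on Pre_ (no mutation involved).

-- truthiness of result['success'] (a list value), the identical test in both Pythons
def succTruthy (result : List (String × List String)) : Bool :=
  ((PySem.Dict.mk result).get? "success").getD [] != []

-- ===== PORT A =====
-- one issue: the six sequential 'if … in issue.lower(): counter += 1' updates
def aStep (d : PySem.Dict String Int) (issue : String) : PySem.Dict String Int :=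
  let d := if PySem.Str.isIn "flickering" (PySem.Str.lower issue) then d.modify "flickering_issues" 0 (· + 1) else d
  let d := if PySem.Str.isIn "position" (PySem.Str.lower issue) then d.modify "positioning_issues" 0 (· + 1) else d
  let d := if PySem.Str.isIn "overlap" (PySem.Str.lower issue) then d.modify "overlap_issues" 0 (· + 1) else d
  let d := if PySem.Str.isIn "fade_out" (PySem.Str.lower issue) then d.modify "fade_out_issues" 0 (· + 1) else d
  let d := if PySem.Str.isIn "smooth" (PySem.Str.lower issue) then d.modify "smoothness_issues" 0 (· + 1) else d
  if PySem.Str.isIn "shape" (PySem.Str.lower issue) then d.modify "shape_issues" 0 (· + 1) else d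

-- one result: "if result['success']: for issue in result.get('issues_found', []): …"
-- (result['success'] raises KeyError when the key is missing — excluded by Pre_)
def aResult (d : PySem.Dict String Int) (result : List (String × List String)) : PySem.Dict String Int :=
  if succTruthy result then
    ((PySem.Dict.mk result).getD "issues_found" []).foldl aStep d
  else d

def analyze_persistent_issues_py (results : List (List (String × List String))) : List (String × Int) :=
  (results.foldl aResult (PySem.Dict.ofList
    [("flickering_issues", (0 : Int)), ("positioning_issues", 0), ("overlap_issues", 0),
     ("fade_out_issues", 0), ("smoothness_issues", 0), ("shape_issues", 0)])).items

-- ===== PORT B =====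
-- the flattened comprehension of lowercased issues from successful results
def bLowered (results : List (List (String × List String))) : List String :=
  (results.filter succTruthy).flatMap
    (fun r => ((PySem.Dict.mk r).getD "issues_found" []).map PySem.Str.lower)

-- sum('sub' in i for i in lowered)
def bCount (sub : String) (lowered : List String) : Int :=
  (lowered.countP (fun i => PySem.Str.isIn sub i) : Nat)

def analyze_persistent_issues_py_alt (results : List (List (String × List String))) : List (String × Int) :=
  let lowered := bLowered results
  [("flickering_issues", bCount "flickering" lowered),
   ("positioning_issues", bCount "position" lowered),
   ("overlap_issues", bCount "overlap" lowered),
   ("fade_out_issues", bCount "fade_out" lowered),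
   ("smoothness_issues", bCount "smooth" lowered),
   ("shape_issues", bCount "shape" lowered)]

-- ===== PRECONDITION & SPEC =====
-- Pre_ excludes exactly the inputs where Python A raises KeyError: a result dict without a 'success' key.
def Pre_analyze_persistent_issues_py (results : List (List (String × List String))) : Prop :=
  (results.all (fun r => r.any (fun p => p.1 == "success"))) = true
instance (results : List (List (String × List String))) : Decidable (Pre_analyze_persistent_issues_py results) := by unfold Pre_analyze_persistent_issues_py; infer_instance
def pvWitness_analyze_persistent_issues_py : (List (List (String × List String))) :=
  [[("success", ["yes"]), ("issues_found", ["Flickering detected", "bad shape"])]]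

def Spec_analyze_persistent_issues_py (results : List (List (String × List String))) (out : List (String × Int)) : Prop := out = analyze_persistent_issues_py_alt results
instance (results : List (List (String × List String))) (out : List (String × Int)) : Decidable (Spec_analyze_persistent_issues_py results out) := by unfold Spec_analyze_persistent_issues_py; infer_instance

-- ===== CLAIM (what is proved, stated in full; the proofs are below) =====
def Claim_equal_analyze_persistent_issues_py : Prop := ∀ (results : List (List (String × List String))), Dom_analyze_persistent_issues_py results → Pre_analyze_persistent_issues_py results → Spec_analyze_persistent_issues_py results (analyze_persistent_issues_py results)

-- ===== LEMMAS AND PROOFS =====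
-- the six category predicates, on a raw issue string
def pHit (sub issue : String) : Bool := PySem.Str.isIn sub (PySem.Str.lower issue)

-- one aStep on a six-key literal state increments the counter of each matched predicate
theorem aStep_items (a1 a2 a3 a4 a5 a6 : Int) (issue : String) :
    aStep (PySem.Dict.mk
      [("flickering_issues", a1), ("positioning_issues", a2), ("overlap_issues", a3),
       ("fade_out_issues", a4), ("smoothness_issues", a5), ("shape_issues", a6)]) issue =
    PySem.Dict.mk
      [("flickering_issues", if pHit "flickering" issue then a1 + 1 else a1),
       ("positioning_issues", if pHit "position" issue then a2 + 1 else a2),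
       ("overlap_issues", if pHit "overlap" issue then a3 + 1 else a3),
       ("fade_out_issues", if pHit "fade_out" issue then a4 + 1 else a4),
       ("smoothness_issues", if pHit "smooth" issue then a5 + 1 else a5),
       ("shape_issues", if pHit "shape" issue then a6 + 1 else a6)] := by
  unfold aStep pHit
  split_ifs <;> rfl

-- folding aStep over an issue list adds countP of each predicate
theorem fold_aStep (issues : List String) (a1 a2 a3 a4 a5 a6 : Int) :
    issues.foldl aStep (PySem.Dict.mk
      [("flickering_issues", a1), ("positioning_issues", a2), ("overlap_issues", a3),
       ("fade_out_issues", a4), ("smoothness_issues", a5), ("shape_issues", a6)]) =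
    PySem.Dict.mk
      [("flickering_issues", a1 + issues.countP (pHit "flickering")),
       ("positioning_issues", a2 + issues.countP (pHit "position")),
       ("overlap_issues", a3 + issues.countP (pHit "overlap")),
       ("fade_out_issues", a4 + issues.countP (pHit "fade_out")),
       ("smoothness_issues", a5 + issues.countP (pHit "smooth")),
       ("shape_issues", a6 + issues.countP (pHit "shape"))] := by
  induction issues generalizing a1 a2 a3 a4 a5 a6 with
  | nil => simp
  | cons i rest ih =>
    simp only [List.foldl_cons, aStep_items, ih, List.countP_cons,
      PySem.Dict.mk.injEq, List.cons.injEq, Prod.mk.injEq, and_true, true_and]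
    split_ifs <;> push_cast <;> omega

-- the raw (un-lowered) flattened issue list of successful results
def rawIssues (results : List (List (String × List String))) : List String :=
  (results.filter succTruthy).flatMap (fun r => (PySem.Dict.mk r).getD "issues_found" [])

theorem fold_aResult (results : List (List (String × List String))) (a1 a2 a3 a4 a5 a6 : Int) :
    results.foldl aResult (PySem.Dict.mk
      [("flickering_issues", a1), ("positioning_issues", a2), ("overlap_issues", a3),
       ("fade_out_issues", a4), ("smoothness_issues", a5), ("shape_issues", a6)]) =
    PySem.Dict.mk
      [("flickering_issues", a1 + (rawIssues results).countP (pHit "flickering")),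
       ("positioning_issues", a2 + (rawIssues results).countP (pHit "position")),
       ("overlap_issues", a3 + (rawIssues results).countP (pHit "overlap")),
       ("fade_out_issues", a4 + (rawIssues results).countP (pHit "fade_out")),
       ("smoothness_issues", a5 + (rawIssues results).countP (pHit "smooth")),
       ("shape_issues", a6 + (rawIssues results).countP (pHit "shape"))] := by
  induction results generalizing a1 a2 a3 a4 a5 a6 with
  | nil => simp [rawIssues]
  | cons r rest ih =>
    by_cases hs : succTruthy r
    · simp only [List.foldl_cons, aResult, fold_aStep, ih,
        rawIssues, List.filter_cons, hs, if_true, List.flatMap_cons, List.countP_append,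
        PySem.Dict.mk.injEq, List.cons.injEq, Prod.mk.injEq, and_true, true_and]
      push_cast
      omega
    · have hraw : rawIssues (r :: rest) = rawIssues rest := by
        simp [rawIssues, hs]
      simp only [List.foldl_cons, aResult, hs, Bool.false_eq_true, if_false, hraw]
      exact ih a1 a2 a3 a4 a5 a6

-- B's count over the lowered list is countP of pHit over the raw list
theorem bCount_eq (sub : String) (results : List (List (String × List String))) :
    bCount sub (bLowered results) = ((rawIssues results).countP (pHit sub) : Nat) := by
  unfold bCount bLowered rawIssues
  congr 1
  induction (results.filter succTruthy) with
  | nil => rfl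
  | cons r rest ih =>
    simp only [List.flatMap_cons, List.countP_append, List.countP_map, ih]
    rfl

-- ===== VERDICT (by name: the statement is the Claim_ definition above) =====
theorem analyze_persistent_issues_py_spec : Claim_equal_analyze_persistent_issues_py := by
  intro results _ _
  unfold Spec_analyze_persistent_issues_py analyze_persistent_issues_py analyze_persistent_issues_py_alt
  rw [show PySem.Dict.ofList
      [("flickering_issues", (0 : Int)), ("positioning_issues", 0), ("overlap_issues", 0),
       ("fade_out_issues", 0), ("smoothness_issues", 0), ("shape_issues", 0)] =
      PySem.Dict.mk
      [("flickering_issues", (0 : Int)), ("positioning_issues", 0), ("overlap_issues", 0),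
       ("fade_out_issues", 0), ("smoothness_issues", 0), ("shape_issues", 0)] from rfl]
  rw [fold_aResult]
  simp [bCount_eq]
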